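-- pv_equiv track=rewrite | github.com/nikhileshjo/CodeForces | 100DaysOfCode/Day49/Following Directions.py | reach_obj
-- ===== SOURCE A (Python) =====
-- def reach_obj(charArr):
--     pos=[0,0]
--     for i in charArr:
--         if i=='U':
--             pos[1]+=1
--         elif i=='D':
--             pos[1]-=1
--         elif i=='L':
--             pos[0]-=1
--         else:
--             pos[0]+=1
--         if pos==[1,1]:
--             return "YES"
--     return "NO"
-- ===== SOURCE B (Python) =====
-- def _prefix_sums(deltas):
--     out = []
--     s = 0
--     for d in deltas:
--         s += d
--         out.append(s)
--     return out
--
-- def reach_obj(charArr):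
--     # decompose the walk into its two independent axes:
--     # stage 1: x-coordinate history; stage 2: y-coordinate history; stage 3: search
--     xs = _prefix_sums(-1 if c == 'L' else 0 if c in ('U', 'D') else 1 for c in charArr)
--     ys = _prefix_sums(1 if c == 'U' else -1 if c == 'D' else 0 for c in charArr)
--     return "YES" if (1, 1) in zip(xs, ys) else "NO"
-- ===== Notes on version B (the rewrite author's own statement) =====
-- stated objective: alternative
-- what changed: B does not simulate the walk with a combined position state: it decomposes the path into its two independent axes, building the full x-coordinate history and y-coordinate history as two separate prefix-sum passes, then zips them and searches for (1,1) in a third pass.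
import Mathlib
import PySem

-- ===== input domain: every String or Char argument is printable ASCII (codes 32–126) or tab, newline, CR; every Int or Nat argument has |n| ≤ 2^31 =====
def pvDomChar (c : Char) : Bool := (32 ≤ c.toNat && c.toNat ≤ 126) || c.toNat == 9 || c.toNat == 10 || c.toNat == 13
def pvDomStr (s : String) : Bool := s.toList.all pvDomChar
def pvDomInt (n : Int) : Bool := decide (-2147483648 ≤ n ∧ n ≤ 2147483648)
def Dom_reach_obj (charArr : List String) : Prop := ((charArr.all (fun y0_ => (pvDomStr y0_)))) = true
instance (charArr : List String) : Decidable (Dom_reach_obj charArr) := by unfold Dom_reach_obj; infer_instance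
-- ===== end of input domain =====

-- B replaces A's single stateful walk by two independent per-axis prefix-sum passes plus a search pass; same O(n) cost, different decomposition.

-- ===== PORT A =====
-- A's loop: mutate pos according to the branch chain, return "YES" as soon as pos == [1,1].
def reachLoop (pos : Int × Int) (l : List String) : String :=
  match l with
  | [] => "NO"
  | i :: rest =>
    let pos' : Int × Int :=
      if i = "U" then (pos.1, pos.2 + 1)
      else if i = "D" then (pos.1, pos.2 - 1)
      else if i = "L" then (pos.1 - 1, pos.2)
      else (pos.1 + 1, pos.2)
    if pos' = ((1 : Int), (1 : Int)) then "YES" else reachLoop pos' rest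

def reach_obj (charArr : List String) : String := reachLoop (0, 0) charArr

-- ===== PORT B =====
-- B's _prefix_sums helper: running sums of a delta list
def prefixSums (s : Int) (l : List Int) : List Int :=
  match l with
  | [] => []
  | d :: r => (s + d) :: prefixSums (s + d) r

-- the two per-move delta expressions of Source B
def dxOf (c : String) : Int := if c = "L" then -1 else if c = "U" ∨ c = "D" then 0 else 1
def dyOf (c : String) : Int := if c = "U" then 1 else if c = "D" then -1 else 0

def reach_obj_alt (charArr : List String) : String :=
  if ((1 : Int), (1 : Int)) ∈ (prefixSums 0 (charArr.map dxOf)).zip (prefixSums 0 (charArr.map dyOf))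
  then "YES" else "NO"

-- ===== PRECONDITION & SPEC =====
def Spec_reach_obj (charArr : List String) (out : String) : Prop := out = reach_obj_alt charArr
instance (charArr : List String) (out : String) : Decidable (Spec_reach_obj charArr out) := by unfold Spec_reach_obj; infer_instance

-- ===== CLAIM =====
def Claim_equal_reach_obj : Prop := ∀ (charArr : List String), Dom_reach_obj charArr → Spec_reach_obj charArr (reach_obj charArr)

-- ===== LEMMAS AND PROOFS =====

theorem reachLoop_eq_zip (l : List String) (pos : Int × Int) :
    reachLoop pos l =
      (if ((1 : Int), (1 : Int)) ∈ (prefixSums pos.1 (l.map dxOf)).zip (prefixSums pos.2 (l.map dyOf))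
       then "YES" else "NO") := by
  induction l generalizing pos with
  | nil => simp [reachLoop, prefixSums]
  | cons c rest ih =>
    have hv : (if c = "U" then ((pos.1 : Int), pos.2 + 1)
        else if c = "D" then (pos.1, pos.2 - 1)
        else if c = "L" then (pos.1 - 1, pos.2)
        else (pos.1 + 1, pos.2)) = (pos.1 + dxOf c, pos.2 + dyOf c) := by
      simp only [dxOf, dyOf]
      split_ifs with h1 h2 h3 <;> simp_all <;> ring
    simp only [reachLoop, List.map_cons, prefixSums, List.zip_cons_cons, List.mem_cons, hv]
    by_cases h : ((pos.1 + dxOf c, pos.2 + dyOf c) : Int × Int) = (1, 1)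
    · simp [h]
    · have h' : ¬ (((1:Int),(1:Int)) = (pos.1 + dxOf c, pos.2 + dyOf c)) := fun hh => h hh.symm
      simp only [h, if_false, ih (pos.1 + dxOf c, pos.2 + dyOf c), h', false_or]

-- ===== VERDICT =====
theorem reach_obj_spec : Claim_equal_reach_obj := by
  intro charArr _
  unfold Spec_reach_obj reach_obj reach_obj_alt
  exact reachLoop_eq_zip charArr (0, 0)
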